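-- pv_equiv track=rewrite | github.com/knowthebird/Prioritize | prioritize.py | order_of_top_priorties
-- ===== SOURCE A (Python) =====
-- from collections.abc import Generator
--
-- def order_of_top_priorties(priorities:list, min_length:int, max_length:int,
--                            begin:int=0, starting_indexes:list=None
--                            ) -> Generator[list, None, None]:
--     """Generates the indexes of the priorities list to use later when generating
--     combinations."""
--
--     end = len(priorities)
--     for index in range(begin, end):
--         if starting_indexes:
--             current_indexes = starting_indexes + [index]
--         else:
--             current_indexes = [index]
--
--         if len(current_indexes) <= max_length:
--             combo_length = sum([len(priorities[index]) for index in current_indexes])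
--             if combo_length <= max_length:
--                 yield current_indexes
--                 yield from order_of_top_priorties(priorities, min_length,
--                                                   max_length, index+1,
--                                                   current_indexes)
-- ===== SOURCE B (Python) =====
-- def order_of_top_priorties(priorities: list, min_length: int, max_length: int,
--                            begin: int = 0, starting_indexes: list = None):
--     """Iterative DFS with an explicit stack of (prefix, next-candidate-index)
--     frames; yields the same index lists in the same preorder as the recursive
--     original. min_length is (deliberately, as in the original) unused."""
--     end = len(priorities)
--     prefix = list(starting_indexes) if starting_indexes else []
--     stack = [(prefix, begin)]
--     while stack:
--         cur, nxt = stack.pop()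
--         if nxt >= end:
--             continue
--         stack.append((cur, nxt + 1))          # sibling continuation
--         combo = cur + [nxt]
--         if len(combo) <= max_length and sum(len(priorities[i]) for i in combo) <= max_length:
--             stack.append((combo, nxt + 1))    # extension frame, explored first
--             yield combo
-- ===== Notes on version B (the rewrite author's own statement) =====
-- stated objective: alternative
-- what changed: The recursive generator (a for-loop with a recursive 'yield from' per yielded combo) is replaced by an iterative DFS over an explicit stack of (prefix, next-index) frames that preserves the original preorder.
import Mathlib
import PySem

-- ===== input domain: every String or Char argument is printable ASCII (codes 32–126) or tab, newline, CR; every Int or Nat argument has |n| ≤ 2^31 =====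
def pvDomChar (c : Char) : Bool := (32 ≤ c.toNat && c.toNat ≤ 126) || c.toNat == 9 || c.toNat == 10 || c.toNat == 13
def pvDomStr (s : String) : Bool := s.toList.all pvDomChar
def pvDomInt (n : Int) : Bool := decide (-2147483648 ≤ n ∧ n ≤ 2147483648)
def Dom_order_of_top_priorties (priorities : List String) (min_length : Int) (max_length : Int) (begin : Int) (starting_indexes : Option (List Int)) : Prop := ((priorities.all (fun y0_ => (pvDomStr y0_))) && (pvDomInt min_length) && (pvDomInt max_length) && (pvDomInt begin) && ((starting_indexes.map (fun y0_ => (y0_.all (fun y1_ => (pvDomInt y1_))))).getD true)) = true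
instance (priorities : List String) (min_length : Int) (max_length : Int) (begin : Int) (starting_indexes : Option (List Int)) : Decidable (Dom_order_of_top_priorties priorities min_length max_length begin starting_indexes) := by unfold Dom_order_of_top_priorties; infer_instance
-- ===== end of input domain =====

-- B replaces A's recursive generator by an iterative DFS over an explicit stack of
-- (prefix, next-index) frames, preserving A's preorder; equivalence is about the list
-- of yielded values (both Pythons are generators, neither mutates its arguments).

-- ===== PORT A =====
-- A's 'for index in range(begin, end)' with 'yield' and 'yield from' is rendered as the
-- obvious structural recursion on the index: one call handles index = begin (yield plus
-- the recursive 'yield from') and then continues the loop as the call at begin+1 with the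
-- same starting_indexes.  'if starting_indexes:' (None and [] falsy) is ported via
-- starting_indexes.getD [] = [].  priorities[index] is ported as pyGetD, exact under
-- Pre_, which admits exactly the inputs where Python never raises IndexError (negative
-- in-range indexes wrap, as in Python).
def order_of_top_priorties (priorities : List String) (min_length : Int) (max_length : Int) (begin : Int) (starting_indexes : Option (List Int)) : List (List Int) :=
  if _h : begin < (priorities.length : Int) then
    let current : List Int :=
      if starting_indexes.getD [] = [] then [begin] else starting_indexes.getD [] ++ [begin]
    if (current.length : Int) ≤ max_length ∧
        (current.map (fun i => PySem.Str.len (PySem.List.pyGetD priorities i ""))).sum ≤ max_length then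
      current :: (order_of_top_priorties priorities min_length max_length (begin + 1) (some current)
        ++ order_of_top_priorties priorities min_length max_length (begin + 1) starting_indexes)
    else
      order_of_top_priorties priorities min_length max_length (begin + 1) starting_indexes
  else []
termination_by ((priorities.length : Int) - begin).toNat
decreasing_by all_goals omega

-- ===== PORT B =====
-- the 'while stack:' loop of Source B; the Lean list is the stack, head = top of stack
def pvBStack (priorities : List String) (max_length : Int) (e : Int) : List (List Int × Int) → List (List Int)
  | [] => []
  | (cur, nxt) :: rest =>
    if _h : e ≤ nxt then
      pvBStack priorities max_length e rest
    else
      let combo := cur ++ [nxt]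
      if (combo.length : Int) ≤ max_length ∧
          (combo.map (fun i => PySem.Str.len (PySem.List.pyGetD priorities i ""))).sum ≤ max_length then
        combo :: pvBStack priorities max_length e ((combo, nxt + 1) :: (cur, nxt + 1) :: rest)
      else
        pvBStack priorities max_length e ((cur, nxt + 1) :: rest)
termination_by stack => (stack.map (fun f => 3 ^ (e - f.2).toNat)).sum
decreasing_by
  · have h1 : 0 < 3 ^ (e - nxt).toNat := pow_pos (by norm_num) _
    simp only [List.map_cons, List.sum_cons]; omega
  · have hk : (e - nxt).toNat = (e - (nxt + 1)).toNat + 1 := by omega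
    have h3 : (3 : Nat) ^ ((e - (nxt + 1)).toNat + 1) = 3 * 3 ^ (e - (nxt + 1)).toNat := by
      rw [pow_succ]; ring
    have h1 : 0 < 3 ^ (e - (nxt + 1)).toNat := pow_pos (by norm_num) _
    simp only [List.map_cons, List.sum_cons, hk, h3]; omega
  · have hk : (e - nxt).toNat = (e - (nxt + 1)).toNat + 1 := by omega
    have h3 : (3 : Nat) ^ ((e - (nxt + 1)).toNat + 1) = 3 * 3 ^ (e - (nxt + 1)).toNat := by
      rw [pow_succ]; ring
    have h1 : 0 < 3 ^ (e - (nxt + 1)).toNat := pow_pos (by norm_num) _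
    simp only [List.map_cons, List.sum_cons, hk, h3]; omega

def order_of_top_priorties_alt (priorities : List String) (min_length : Int) (max_length : Int) (begin : Int) (starting_indexes : Option (List Int)) : List (List Int) :=
  -- starting_indexes.getD [] = 'list(starting_indexes) if starting_indexes else []'
  pvBStack priorities max_length (priorities.length : Int) [(starting_indexes.getD [], begin)]

-- ===== PRECONDITION & SPEC =====
-- Exactly the inputs on which Python A returns (no IndexError): indexes are dereferenced
-- iff the first count check can pass (the count there is len(starting_indexes or [])+1)
-- and the range is nonempty; in that case begin and every starting index must be a valid
-- (possibly negative) Python index into priorities.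
def Pre_order_of_top_priorties (priorities : List String) (min_length : Int) (max_length : Int) (begin : Int) (starting_indexes : Option (List Int)) : Prop :=
  (((starting_indexes.getD []).length : Int) + 1 ≤ max_length ∧ begin < (priorities.length : Int)) →
    (-(priorities.length : Int) ≤ begin ∧
      ∀ i ∈ starting_indexes.getD [], -(priorities.length : Int) ≤ i ∧ i < (priorities.length : Int))
instance (priorities : List String) (min_length : Int) (max_length : Int) (begin : Int) (starting_indexes : Option (List Int)) : Decidable (Pre_order_of_top_priorties priorities min_length max_length begin starting_indexes) := by unfold Pre_order_of_top_priorties; infer_instance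

def pvWitness_order_of_top_priorties : List String × Int × Int × Int × Option (List Int) :=
  (["a", "bb"], 0, 2, 0, none)

def Spec_order_of_top_priorties (priorities : List String) (min_length : Int) (max_length : Int) (begin : Int) (starting_indexes : Option (List Int)) (out : List (List Int)) : Prop := out = order_of_top_priorties_alt priorities min_length max_length begin starting_indexes
instance (priorities : List String) (min_length : Int) (max_length : Int) (begin : Int) (starting_indexes : Option (List Int)) (out : List (List Int)) : Decidable (Spec_order_of_top_priorties priorities min_length max_length begin starting_indexes out) := by unfold Spec_order_of_top_priorties; infer_instance

-- ===== CLAIM (what is proved, stated in full; the proofs are below) =====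
def Claim_equal_order_of_top_priorties : Prop := ∀ (priorities : List String) (min_length : Int) (max_length : Int) (begin : Int) (starting_indexes : Option (List Int)), Dom_order_of_top_priorties priorities min_length max_length begin starting_indexes → Pre_order_of_top_priorties priorities min_length max_length begin starting_indexes → Spec_order_of_top_priorties priorities min_length max_length begin starting_indexes (order_of_top_priorties priorities min_length max_length begin starting_indexes)

-- ===== LEMMAS AND PROOFS =====

theorem pv_if_nil_append (cur0 : List Int) (n : Int) :
    (if cur0 = [] then [n] else cur0 ++ [n]) = cur0 ++ [n] := by
  cases cur0 <;> simp

-- processing one frame (cur, n) on top of the stack emits exactly A's subtree for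
-- starting_indexes = some cur, begin = n, then continues with the rest of the stack
theorem pvBStack_frame (priorities : List String) (min_length max_length : Int) :
    ∀ (k : Nat) (n : Int), ((priorities.length : Int) - n).toNat ≤ k →
      ∀ (cur : List Int) (rest : List (List Int × Int)),
        pvBStack priorities max_length (priorities.length : Int) ((cur, n) :: rest)
          = order_of_top_priorties priorities min_length max_length n (some cur)
              ++ pvBStack priorities max_length (priorities.length : Int) rest := by
  intro k
  induction k with
  | zero =>
    intro n hk cur rest
    have hn : (priorities.length : Int) ≤ n := by omega
    conv_lhs => rw [pvBStack]
    conv_rhs => rw [order_of_top_priorties]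
    simp [hn, not_lt.mpr hn]
  | succ k ih =>
    intro n hk cur rest
    by_cases hn : (priorities.length : Int) ≤ n
    · conv_lhs => rw [pvBStack]
      conv_rhs => rw [order_of_top_priorties]
      simp [hn, not_lt.mpr hn]
    · have hlt : n < (priorities.length : Int) := lt_of_not_ge hn
      conv_lhs => rw [pvBStack]
      conv_rhs => rw [order_of_top_priorties]
      simp only [dif_neg hn, dif_pos hlt, Option.getD_some, pv_if_nil_append]
      split_ifs with hok
      · rw [ih (n + 1) (by omega) (cur ++ [n]) ((cur, n + 1) :: rest),
            ih (n + 1) (by omega) cur rest]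
        simp
      · rw [ih (n + 1) (by omega) cur rest]

-- A behaves identically for starting_indexes = none and = some [] (both falsy in Python)
theorem pv_orderA_none_eq_some_nil (priorities : List String) (min_length max_length : Int) :
    ∀ (k : Nat) (n : Int), ((priorities.length : Int) - n).toNat ≤ k →
      order_of_top_priorties priorities min_length max_length n none
        = order_of_top_priorties priorities min_length max_length n (some []) := by
  intro k
  induction k with
  | zero =>
    intro n hk
    have hn : (priorities.length : Int) ≤ n := by omega
    conv_lhs => rw [order_of_top_priorties]
    conv_rhs => rw [order_of_top_priorties]
    simp [not_lt.mpr hn]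
  | succ k ih =>
    intro n hk
    by_cases hn : (priorities.length : Int) ≤ n
    · conv_lhs => rw [order_of_top_priorties]
      conv_rhs => rw [order_of_top_priorties]
      simp [not_lt.mpr hn]
    · have hlt : n < (priorities.length : Int) := lt_of_not_ge hn
      conv_lhs => rw [order_of_top_priorties]
      conv_rhs => rw [order_of_top_priorties]
      simp only [dif_pos hlt, Option.getD_none, Option.getD_some, if_pos rfl]
      rw [ih (n + 1) (by omega)]

-- ===== VERDICT (by name: the statement is the Claim_ definition above) =====
theorem order_of_top_priorties_spec : Claim_equal_order_of_top_priorties := by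
  intro priorities min_length max_length bg si _hDom _hPre
  unfold Spec_order_of_top_priorties order_of_top_priorties_alt
  rw [pvBStack_frame priorities min_length max_length
        (((priorities.length : Int) - bg).toNat) bg le_rfl (si.getD []) []]
  rw [pvBStack]
  rw [List.append_nil]
  cases si with
  | none =>
    exact pv_orderA_none_eq_some_nil priorities min_length max_length
      (((priorities.length : Int) - bg).toNat) bg le_rfl
  | some l =>
    cases l with
    | nil =>
      exact pv_orderA_none_eq_some_nil priorities min_length max_length
        (((priorities.length : Int) - bg).toNat) bg le_rfl ▸ rfl
    | cons a t => rfl
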